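-- pv_equiv track=rewrite | github.com/yux-lab/TeXnically | dataset/preprocessing/data_preprocess_TeXnically.py | remove_redundant_nested_braces
-- ===== SOURCE A (Python) =====
-- def remove_redundant_nested_braces(text):
--     chars, stack, remove = list(text), [], set()
--     for i, ch in enumerate(chars):
--         if ch == '{': stack.append(i)
--         elif ch == '}' and stack:
--             start = stack.pop()
--             inner = ''.join(chars[start + 1:i]).strip()
--             if inner.startswith('{') and inner.endswith('}'):
--                 remove.update({start, i})
--     return ''.join(ch for i, ch in enumerate(chars) if i not in remove)
-- ===== SOURCE B (Python) =====
-- def remove_redundant_nested_braces(text):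
--     # One pass, no slicing/strip per pair: for each open brace keep the first
--     # non-whitespace character seen after it; track the last non-whitespace
--     # character seen so far.  For a pair (start, i) the stripped inner text
--     # starts with '{' iff the first non-ws char after start is '{', and ends
--     # with '}' iff the last non-ws char seen before i is '}' (it lies inside
--     # the pair whenever the first one exists).
--     chars = list(text)
--     stack = []            # entries [open_index, first_nonws_char_after_or_None]
--     last_nonws = None     # last non-whitespace char seen so far
--     remove = set()
--     for i, ch in enumerate(chars):
--         if ch == '{':
--             if stack and stack[-1][1] is None:
--                 stack[-1][1] = ch
--             stack.append([i, None])
--             last_nonws = ch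
--         elif ch == '}':
--             if stack:
--                 start, first = stack.pop()
--                 if first == '{' and last_nonws == '}':
--                     remove.add(start)
--                     remove.add(i)
--             if stack and stack[-1][1] is None:
--                 stack[-1][1] = ch
--             last_nonws = ch
--         elif not ch.isspace():
--             if stack and stack[-1][1] is None:
--                 stack[-1][1] = ch
--             last_nonws = ch
--     return ''.join(ch for i, ch in enumerate(chars) if i not in remove)
-- ===== Notes on version B (the rewrite author's own statement) =====
-- stated objective: alternative
-- what changed: A re-joins, strips and scans the whole inner slice for every matched brace pair; B instead makes a single pass that keeps, for each open brace on the stack, the first non-whitespace character seen after it and, globally, the last non-whitespace character seen so far, and decides each brace pair from those two characters without any slicing or stripping (worst-case asymptotics improve on deeply nested input, but on the generated inputs the measured cost is the same).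
import Mathlib
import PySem

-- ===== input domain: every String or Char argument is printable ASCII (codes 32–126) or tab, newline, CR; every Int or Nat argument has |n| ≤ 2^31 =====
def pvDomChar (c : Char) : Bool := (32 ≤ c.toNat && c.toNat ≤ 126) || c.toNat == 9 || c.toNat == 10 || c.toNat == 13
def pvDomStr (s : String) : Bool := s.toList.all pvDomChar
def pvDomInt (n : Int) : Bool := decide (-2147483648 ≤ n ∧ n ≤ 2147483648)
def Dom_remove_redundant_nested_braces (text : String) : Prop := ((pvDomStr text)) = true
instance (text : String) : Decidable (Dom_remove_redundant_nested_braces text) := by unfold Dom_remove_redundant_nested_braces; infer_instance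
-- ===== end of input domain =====

-- B rewrites A's per-pair slice+strip test into a single pass that tracks, per open brace, the
-- first non-whitespace character after it and, globally, the last non-whitespace character seen.

-- ===== PORT A =====
def pvStepA (chars : List Char) (st : List Int × PySem.Set Int) (ic : Int × Char) :
    List Int × PySem.Set Int :=
  let stack := st.1
  let remove := st.2
  let i := ic.1
  let ch := ic.2
  if ch = '{' then (i :: stack, remove)
  else if ch = '}' then
    match stack with
    | [] => (stack, remove)          -- "and stack" fails: nothing happens
    | start :: rest =>
      let inner := PySem.Chars.strip (PySem.List.slice chars (some (start + 1)) (some i))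
      if PySem.Chars.startswith inner ['{'] && PySem.Chars.endswith inner ['}'] then
        (rest, PySem.Set.add (PySem.Set.add remove start) i)
      else (rest, remove)
  else (stack, remove)

def remove_redundant_nested_braces (text : String) : String :=
  let chars := text.toList
  let st := (PySem.List.enumerate chars).foldl (pvStepA chars) ([], PySem.Set.empty)
  String.ofList (((PySem.List.enumerate chars).filter
    (fun ic => !(PySem.Set.contains st.2 ic.1))).map (·.2))

-- ===== PORT B =====
-- stack[-1][1] = ch if the top entry's first-non-ws slot is still empty
def pvSetTopFirst (stack : List (Int × Option Char)) (ch : Char) : List (Int × Option Char) :=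
  match stack with
  | (s, none) :: rest => (s, some ch) :: rest
  | st => st

def pvStepB (st : List (Int × Option Char) × Option Char × PySem.Set Int) (ic : Int × Char) :
    List (Int × Option Char) × Option Char × PySem.Set Int :=
  let stack := st.1
  let last := st.2.1
  let remove := st.2.2
  let i := ic.1
  let ch := ic.2
  if ch = '{' then ((i, none) :: pvSetTopFirst stack ch, some ch, remove)
  else if ch = '}' then
    match stack with
    | [] => ([], some ch, remove)
    | (start, first) :: rest =>
      let remove' := if first == some '{' && last == some '}' then
          PySem.Set.add (PySem.Set.add remove start) i
        else remove
      (pvSetTopFirst rest ch, some ch, remove')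
  else if !(PySem.Chars.isspace ch) then (pvSetTopFirst stack ch, some ch, remove)
  else st

def remove_redundant_nested_braces_alt (text : String) : String :=
  let chars := text.toList
  let st := (PySem.List.enumerate chars).foldl pvStepB ([], none, PySem.Set.empty)
  String.ofList (((PySem.List.enumerate chars).filter
    (fun ic => !(PySem.Set.contains st.2.2 ic.1))).map (·.2))

-- ===== PRECONDITION & SPEC =====
def Spec_remove_redundant_nested_braces (text : String) (out : String) : Prop := out = remove_redundant_nested_braces_alt text
instance (text : String) (out : String) : Decidable (Spec_remove_redundant_nested_braces text out) := by unfold Spec_remove_redundant_nested_braces; infer_instance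

-- ===== CLAIM (what is proved, stated in full; the proofs are below) =====
def Claim_equal_remove_redundant_nested_braces : Prop := ∀ (text : String), Dom_remove_redundant_nested_braces text → Spec_remove_redundant_nested_braces text (remove_redundant_nested_braces text)

-- ===== LEMMAS AND PROOFS =====

-- non-whitespace predicate
def pvP (c : Char) : Bool := !(PySem.Chars.isspace c)

-- first non-ws char of done at positions ≥ a
def pvFNW (done : List Char) (a : Nat) : Option Char := ((done.drop a).filter pvP).head?

-- last non-ws char of done
def pvLNW (done : List Char) : Option Char := (done.filter pvP).getLast?

-- the loop invariant tying A's state to B's after processing the prefix `done`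
def pvInv (done : List Char) (a : List Int × PySem.Set Int)
    (b : List (Int × Option Char) × Option Char × PySem.Set Int) : Prop :=
  b.1 = a.1.map (fun s => (s, pvFNW done (s.toNat + 1)))
  ∧ b.2.1 = pvLNW done
  ∧ b.2.2 = a.2
  ∧ (∀ s ∈ a.1, 0 ≤ s ∧ s.toNat < done.length)
  ∧ (∀ s ∈ a.1.tail, pvFNW done (s.toNat + 1) ≠ none)

theorem pv_filter_dropWhile (l : List Char) :
    (List.dropWhile PySem.Chars.isspace l).filter pvP = l.filter pvP := by
  induction l with
  | nil => rfl
  | cons a t ih =>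
    by_cases h : PySem.Chars.isspace a
    · simp [h, pvP, ih]
    · simp [h, pvP]


theorem pv_head_dropWhile (l : List Char) :
    (List.dropWhile PySem.Chars.isspace l).head? = (l.filter pvP).head? := by
  induction l with
  | nil => rfl
  | cons a t ih =>
    by_cases h : PySem.Chars.isspace a
    · simp [h, pvP, ih]
    · simp [h, pvP]


theorem pv_rstrip_cons (a : Char) (t : List Char) (h : PySem.Chars.isspace a = false) :
    PySem.Chars.rstrip (a :: t) = a :: PySem.Chars.rstrip t := by
  unfold PySem.Chars.rstrip
  rw [List.reverse_cons, List.dropWhile_append]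
  split_ifs with hE
  · rw [List.isEmpty_iff] at hE
    simp [h, hE]
  · simp

theorem pv_strip_head (l : List Char) :
    (PySem.Chars.strip l).head? = (l.filter pvP).head? := by
  unfold PySem.Chars.strip PySem.Chars.lstrip
  rcases hm : List.dropWhile PySem.Chars.isspace l with _ | ⟨a, t⟩
  · have : l.filter pvP = [] := by
      rw [← pv_filter_dropWhile, hm]; rfl
    simp [PySem.Chars.rstrip, this]
  · have ha : PySem.Chars.isspace a = false := by
      have := List.head?_dropWhile_not PySem.Chars.isspace l
      rw [hm] at this
      simpa using this
    rw [pv_rstrip_cons a t ha]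
    have := pv_head_dropWhile l
    rw [hm] at this
    simp only [List.head?_cons] at this ⊢
    exact this


theorem pv_strip_getLast (l : List Char) :
    (PySem.Chars.strip l).getLast? = (l.filter pvP).getLast? := by
  unfold PySem.Chars.strip PySem.Chars.rstrip PySem.Chars.lstrip
  rw [List.getLast?_reverse, pv_head_dropWhile, List.filter_reverse, List.head?_reverse,
    pv_filter_dropWhile]


theorem pv_startswith_single (s : List Char) (c : Char) :
    PySem.Chars.startswith s [c] = (s.head? == some c) := by
  cases s with
  | nil => simp [PySem.Chars.startswith, List.isPrefixOf]
  | cons a t => simp [PySem.Chars.startswith, List.isPrefixOf, BEq.comm]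


theorem pv_endswith_single (s : List Char) (c : Char) :
    PySem.Chars.endswith s [c] = (s.getLast? == some c) := by
  have : PySem.Chars.endswith s [c] = PySem.Chars.startswith s.reverse [c] := by
    simp [PySem.Chars.endswith, PySem.Chars.startswith, List.isSuffixOf]
  rw [this, pv_startswith_single, List.head?_reverse]


theorem pv_condA (l : List Char) :
    (PySem.Chars.startswith (PySem.Chars.strip l) ['{'] &&
      PySem.Chars.endswith (PySem.Chars.strip l) ['}'])
    = (((l.filter pvP).head? == some '{') && ((l.filter pvP).getLast? == some '}')) := by
  rw [pv_startswith_single, pv_endswith_single, pv_strip_head, pv_strip_getLast]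


theorem pv_fnw_step (done : List Char) (c : Char) (a : Nat) (h : a ≤ done.length) :
    pvFNW (done ++ [c]) a = (pvFNW done a).or (if pvP c then some c else none) := by
  unfold pvFNW
  rw [List.drop_append_of_le_length h, List.filter_append, List.head?_append]
  by_cases hc : pvP c <;> simp [hc]


theorem pv_fnw_top (done : List Char) (c : Char) :
    pvFNW (done ++ [c]) (done.length + 1) = none := by
  unfold pvFNW
  rw [List.drop_eq_nil_of_le (by simp)]
  rfl


theorem pv_lnw_step (done : List Char) (c : Char) :
    pvLNW (done ++ [c]) = if pvP c then some c else pvLNW done := by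
  unfold pvLNW
  rw [List.filter_append, List.getLast?_append]
  by_cases hc : pvP c <;> simp [hc]


-- if the region past a contains a non-ws char, the global last non-ws char is in that region
theorem pv_lnw_region (done : List Char) (a : Nat) (c : Char)
    (h : ((done.drop a).filter pvP).head? = some c) :
    pvLNW done = ((done.drop a).filter pvP).getLast? := by
  have hsplit : done = done.take a ++ done.drop a := (List.take_append_drop a done).symm
  have hne : (done.drop a).filter pvP ≠ [] := by
    intro hnil; rw [hnil] at h; simp at h
  unfold pvLNW
  conv_lhs => rw [hsplit]
  rw [List.filter_append, List.getLast?_append,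
    Option.or_of_isSome (by rwa [List.getLast?_isSome])]


theorem pv_setTop_map (pre : List Char) (c : Char) (st : List Int)
    (hlt : ∀ s ∈ st, s.toNat < pre.length)
    (htail : ∀ s ∈ st.tail, pvFNW pre (s.toNat + 1) ≠ none)
    (hpc : pvP c = true) :
    pvSetTopFirst (st.map (fun s => (s, pvFNW pre (s.toNat + 1)))) c
      = st.map (fun s => (s, pvFNW (pre ++ [c]) (s.toNat + 1))) := by
  cases st with
  | nil => rfl
  | cons s rest =>
    have hrest : rest.map (fun s => (s, pvFNW pre (s.toNat + 1)))
        = rest.map (fun s => (s, pvFNW (pre ++ [c]) (s.toNat + 1))) := by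
      apply List.map_congr_left
      intro x hx
      have hne := htail x (by simpa using hx)
      have hle : x.toNat + 1 ≤ pre.length := hlt x (List.mem_cons_of_mem _ hx)
      rw [pv_fnw_step pre c _ hle]
      rcases ho : pvFNW pre (x.toNat + 1) with _ | v
      · exact absurd ho hne
      · simp
    have hle : s.toNat + 1 ≤ pre.length := hlt s (by simp)
    rcases ho : pvFNW pre (s.toNat + 1) with _ | v <;>
      simp [pvSetTopFirst, List.map_cons, ho, pv_fnw_step pre c _ hle, hpc, hrest]

theorem pv_slice_eq (pre : List Char) (c : Char) (suf : List Char) (start : Int)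
    (h0 : 0 ≤ start) (hlt : start.toNat < pre.length) :
    PySem.List.slice (pre ++ c :: suf) (some (start + 1)) (some (pre.length : Int))
      = pre.drop (start.toNat + 1) := by
  rw [PySem.List.slice_toNat _ (by omega) (by exact_mod_cast Int.natCast_nonneg pre.length)]
  have h1 : (start + 1).toNat = start.toNat + 1 := by omega
  have h2 : ((pre.length : Int)).toNat = pre.length := Int.toNat_natCast _
  rw [h1, h2, List.drop_append_of_le_length (by omega)]
  rw [List.take_append_of_le_length (by simp)]
  exact List.take_of_length_le (by simp)

theorem pv_step_inv (pre : List Char) (c : Char) (suf : List Char)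
    (A : List Int × PySem.Set Int) (B : List (Int × Option Char) × Option Char × PySem.Set Int)
    (h : pvInv pre A B) :
    pvInv (pre ++ [c]) (pvStepA (pre ++ c :: suf) A ((pre.length : Int), c))
      (pvStepB B ((pre.length : Int), c)) := by
  obtain ⟨sA, rA⟩ := A
  obtain ⟨sB, lB, rB⟩ := B
  obtain ⟨h1, h2, h3, h4, h5⟩ := h
  simp only at h1 h2 h3 h4 h5
  subst h1; subst h2; subst h3
  by_cases hc1 : c = '{'
  · subst hc1
    have hpc : pvP '{' = true := by decide
    have htop : pvFNW (pre ++ ['{']) (((pre.length : Int)).toNat + 1) = none := by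
      rw [Int.toNat_natCast]; exact pv_fnw_top pre '{'
    simp only [pvStepA, pvStepB, Char.reduceEq, reduceIte]
    refine ⟨?_, ?_, rfl, ?_, ?_⟩
    · simp only [List.map_cons, htop,
        pv_setTop_map pre '{' sA (fun s hs => (h4 s hs).2) h5 hpc]
    · simp [pv_lnw_step, hpc]
    · intro s hs
      rcases List.mem_cons.mp hs with hh | hh
      · subst hh
        refine ⟨by positivity, ?_⟩
        simp [List.length_append]
      · obtain ⟨ha, hb⟩ := h4 s hh
        refine ⟨ha, ?_⟩
        simp only [List.length_append, List.length_cons, List.length_nil]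
        omega
    · intro s hs
      simp only [List.tail_cons] at hs
      have hle : s.toNat + 1 ≤ pre.length := (h4 s hs).2
      rw [pv_fnw_step pre '{' _ hle]
      rcases pvFNW pre (s.toNat + 1) <;> simp [hpc]
  · by_cases hc2 : c = '}'
    · subst hc2
      have hpc : pvP '}' = true := by decide
      rcases sA with _ | ⟨start, rest⟩
      · simp only [pvStepA, pvStepB, List.map_nil, Char.reduceEq, reduceIte]
        refine ⟨rfl, ?_, rfl, by simp, by simp⟩
        simp [pv_lnw_step, hpc]
      · have h0 : 0 ≤ start := (h4 start (by simp)).1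
        have hlt : start.toNat < pre.length := (h4 start (by simp)).2
        have hD := pv_slice_eq pre '}' suf start h0 hlt
        have hcond :
            (PySem.Chars.startswith (PySem.Chars.strip (pre.drop (start.toNat + 1))) ['{'] &&
             PySem.Chars.endswith (PySem.Chars.strip (pre.drop (start.toNat + 1))) ['}'])
            = ((pvFNW pre (start.toNat + 1) == some '{') && (pvLNW pre == some '}')) := by
          rw [pv_condA]
          simp only [pvFNW]
          by_cases hx : ((pre.drop (start.toNat + 1)).filter pvP).head? = some '{'
          · have hr := pv_lnw_region pre (start.toNat + 1) '{' hx
            simp only [pvLNW] at hr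
            rw [← hr]
            rfl
          · have hX : (((pre.drop (start.toNat + 1)).filter pvP).head? == some '{') = false :=
              beq_eq_false_iff_ne.mpr hx
            rw [hX]
            simp
        simp only [pvStepA, pvStepB, List.map_cons, Char.reduceEq, reduceIte]
        rw [hD, hcond]
        rcases Bool.eq_false_or_eq_true
            (pvFNW pre (start.toNat + 1) == some '{' && pvLNW pre == some '}') with hb | hb
        · simp only [if_pos hb]
          refine ⟨?_, ?_, rfl, ?_, ?_⟩
          · exact pv_setTop_map pre '}' rest
              (fun s hs => (h4 s (List.mem_cons_of_mem _ hs)).2)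
              (fun s hs => h5 s (by simpa using List.mem_of_mem_tail hs)) hpc
          · simp [pv_lnw_step, hpc]
          · intro s hs
            obtain ⟨ha, hb2⟩ := h4 s (List.mem_cons_of_mem _ hs)
            refine ⟨ha, ?_⟩
            simp only [List.length_append, List.length_cons, List.length_nil]
            omega
          · intro s hs
            have hmem : s ∈ rest := List.mem_of_mem_tail hs
            have hle : s.toNat + 1 ≤ pre.length := (h4 s (List.mem_cons_of_mem _ hmem)).2
            have hne := h5 s (by simpa using hmem)
            rw [pv_fnw_step pre '}' _ hle]
            rcases ho : pvFNW pre (s.toNat + 1) with _ | v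
            · exact absurd ho hne
            · simp
        · simp only [if_neg (show ¬ ((pvFNW pre (start.toNat + 1) == some '{' &&
              pvLNW pre == some '}') = true) from by simp [hb])]
          refine ⟨?_, ?_, rfl, ?_, ?_⟩
          · exact pv_setTop_map pre '}' rest
              (fun s hs => (h4 s (List.mem_cons_of_mem _ hs)).2)
              (fun s hs => h5 s (by simpa using List.mem_of_mem_tail hs)) hpc
          · simp [pv_lnw_step, hpc]
          · intro s hs
            obtain ⟨ha, hb2⟩ := h4 s (List.mem_cons_of_mem _ hs)
            refine ⟨ha, ?_⟩
            simp only [List.length_append, List.length_cons, List.length_nil]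
            omega
          · intro s hs
            have hmem : s ∈ rest := List.mem_of_mem_tail hs
            have hle : s.toNat + 1 ≤ pre.length := (h4 s (List.mem_cons_of_mem _ hmem)).2
            have hne := h5 s (by simpa using hmem)
            rw [pv_fnw_step pre '}' _ hle]
            rcases ho : pvFNW pre (s.toNat + 1) with _ | v
            · exact absurd ho hne
            · simp
    · by_cases hsp : PySem.Chars.isspace c
      · have hpc : pvP c = false := by simp [pvP, hsp]
        have hB : (!PySem.Chars.isspace c) = false := by simp [hsp]
        simp only [pvStepA, pvStepB, if_neg hc1, if_neg hc2, hB, Bool.false_eq_true, if_false]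
        refine ⟨?_, ?_, rfl, ?_, ?_⟩
        · apply List.map_congr_left
          intro x hx
          have hle : x.toNat + 1 ≤ pre.length := (h4 x hx).2
          rw [pv_fnw_step pre c _ hle, hpc]
          simp
        · simp [pv_lnw_step, hpc]
        · intro s hs
          obtain ⟨ha, hb⟩ := h4 s hs
          refine ⟨ha, ?_⟩
          simp only [List.length_append, List.length_cons, List.length_nil]
          omega
        · intro s hs
          have hle : s.toNat + 1 ≤ pre.length := (h4 s (List.mem_of_mem_tail hs)).2
          rw [pv_fnw_step pre c _ hle, hpc]
          simpa using h5 s hs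
      · have hpc : pvP c = true := by simp [pvP, hsp]
        have hB : (!PySem.Chars.isspace c) = true := by simp [hsp]
        simp only [pvStepA, pvStepB, if_neg hc1, if_neg hc2, hB, if_true]
        refine ⟨?_, ?_, rfl, ?_, ?_⟩
        · exact pv_setTop_map pre c sA (fun s hs => (h4 s hs).2) h5 hpc
        · simp [pv_lnw_step, hpc]
        · intro s hs
          obtain ⟨ha, hb⟩ := h4 s hs
          refine ⟨ha, ?_⟩
          simp only [List.length_append, List.length_cons, List.length_nil]
          omega
        · intro s hs
          have hle : s.toNat + 1 ≤ pre.length := (h4 s (List.mem_of_mem_tail hs)).2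
          rw [pv_fnw_step pre c _ hle, hpc]
          rcases pvFNW pre (s.toNat + 1) <;> simp

theorem pv_loop_inv (suf : List Char) : ∀ (pre : List Char)
    (A : List Int × PySem.Set Int) (B : List (Int × Option Char) × Option Char × PySem.Set Int),
    pvInv pre A B →
    pvInv (pre ++ suf)
      (List.foldl (pvStepA (pre ++ suf)) A (PySem.List.enumerate suf (pre.length : Int)))
      (List.foldl pvStepB B (PySem.List.enumerate suf (pre.length : Int))) := by
  induction suf with
  | nil =>
    intro pre A B h
    simpa [PySem.List.enumerate_nil] using h
  | cons c t ih =>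
    intro pre A B h
    rw [PySem.List.enumerate_cons]
    simp only [List.foldl_cons]
    have h1 := pv_step_inv pre c t A B h
    have h2 := ih (pre ++ [c]) _ _ h1
    have e1 : (pre ++ [c]) ++ t = pre ++ c :: t := by simp
    have e2 : (((pre ++ [c]).length : Nat) : Int) = (pre.length : Int) + 1 := by
      have hone : ([c] : List Char).length = 1 := rfl
      push_cast [List.length_append, hone]
      ring
    rw [e1, e2] at h2
    exact h2

-- ===== VERDICT (by name: the statement is the Claim_ definition above) =====
theorem remove_redundant_nested_braces_spec : Claim_equal_remove_redundant_nested_braces := by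
  intro text _
  unfold Spec_remove_redundant_nested_braces
  unfold remove_redundant_nested_braces remove_redundant_nested_braces_alt
  have h := pv_loop_inv text.toList [] ([], PySem.Set.empty) ([], none, PySem.Set.empty)
    (by constructor <;> simp [pvLNW])
  simp only [List.nil_append, List.length_nil, Nat.cast_zero] at h
  obtain ⟨-, -, hrem, -, -⟩ := h
  simp only [hrem]
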